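-- pv_equiv track=rewrite | github.com/notl0cal/projects | mvmnt.py | mvmnt
-- ===== SOURCE A (Python) =====
-- def mvmnt(string:str):
--     n = 0
--     s = 0
--     w = 0
--     e = 0
--     for letter in string:
--         if letter == "N":
--             n += 1
--         elif letter == "S":
--             s += 1
--         elif letter == "W":
--             w += 1
--         elif letter == "E":
--             e += 1
--     if n > s:
--         y = "N"
--     elif s > n:
--         y = "S"
--     else:
--         y = ""
--     if w > e:
--         x = "W"
--     elif e > w:
--         x = "E"
--     else:
--         x = ""
--     result = y + x
--     return result
-- ===== SOURCE B (Python) =====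
-- def mvmnt(string: str):
--     # Stack-based cancellation: opposite letters on the same axis annihilate;
--     # the answer is read off the surviving stack tops (no counters, no comparisons).
--     ys = []
--     xs = []
--     for c in string:
--         if c == "N" or c == "S":
--             if ys and ys[-1] != c:
--                 ys.pop()
--             else:
--                 ys.append(c)
--         elif c == "W" or c == "E":
--             if xs and xs[-1] != c:
--                 xs.pop()
--             else:
--                 xs.append(c)
--     y = ys[-1] if ys else ""
--     x = xs[-1] if xs else ""
--     return y + x
-- ===== Notes on version B (the rewrite author's own statement) =====
-- stated objective: alternative
-- what changed: Replaces counting-and-comparing with stack-based cancellation: each axis keeps a stack where an incoming letter annihilates an opposite letter on top (otherwise it is pushed), and the result is read off the surviving stack tops rather than from counter comparisons.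
import Mathlib
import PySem

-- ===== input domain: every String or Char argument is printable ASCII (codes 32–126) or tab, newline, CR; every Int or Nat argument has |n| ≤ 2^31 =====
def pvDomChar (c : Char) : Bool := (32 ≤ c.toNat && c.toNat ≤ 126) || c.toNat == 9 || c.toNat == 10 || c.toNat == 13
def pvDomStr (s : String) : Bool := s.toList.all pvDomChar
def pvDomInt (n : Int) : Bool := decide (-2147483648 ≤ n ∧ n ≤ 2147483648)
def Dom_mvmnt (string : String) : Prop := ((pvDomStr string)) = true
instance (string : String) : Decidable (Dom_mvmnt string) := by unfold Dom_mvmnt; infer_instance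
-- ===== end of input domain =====

-- B replaces A's counting-and-comparing with per-axis cancellation stacks where opposite letters annihilate; same cost, different algorithm.

-- ===== PORT A =====
def mvmnt (string : String) : String :=
  let st := string.toList.foldl (fun (acc : Int × Int × Int × Int) letter =>
    if letter == 'N' then (acc.1 + 1, acc.2.1, acc.2.2.1, acc.2.2.2)
    else if letter == 'S' then (acc.1, acc.2.1 + 1, acc.2.2.1, acc.2.2.2)
    else if letter == 'W' then (acc.1, acc.2.1, acc.2.2.1 + 1, acc.2.2.2)
    else if letter == 'E' then (acc.1, acc.2.1, acc.2.2.1, acc.2.2.2 + 1)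
    else acc) (0, 0, 0, 0)
  let y := if st.1 > st.2.1 then "N" else if st.2.1 > st.1 then "S" else ""
  let x := if st.2.2.1 > st.2.2.2 then "W" else if st.2.2.2 > st.2.2.1 then "E" else ""
  y ++ x

-- ===== PORT B =====
def mvmnt_alt (string : String) : String :=
  let st := string.toList.foldl (fun (acc : List Char × List Char) c =>
    if c == 'N' || c == 'S' then
      (if acc.1 ≠ [] ∧ acc.1.getLast? ≠ some c then acc.1.dropLast else acc.1 ++ [c], acc.2)
    else if c == 'W' || c == 'E' then
      (acc.1, if acc.2 ≠ [] ∧ acc.2.getLast? ≠ some c then acc.2.dropLast else acc.2 ++ [c])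
    else acc) ([], [])
  let y := match st.1.getLast? with | some c => String.ofList [c] | none => ""
  let x := match st.2.getLast? with | some c => String.ofList [c] | none => ""
  y ++ x

-- ===== PRECONDITION & SPEC =====
def Spec_mvmnt (string : String) (out : String) : Prop := out = mvmnt_alt string
instance (string : String) (out : String) : Decidable (Spec_mvmnt string out) := by unfold Spec_mvmnt; infer_instance

-- ===== CLAIM (what is proved, stated in full; the proofs are below) =====
def Claim_equal_mvmnt : Prop := ∀ (string : String), Dom_mvmnt string → Spec_mvmnt string (mvmnt string)

-- ===== LEMMAS AND PROOFS =====

-- canonical shape of a cancellation stack with net balance d (positive: a's, negative: b's)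
def pvRep (a b : Char) (d : Int) : List Char :=
  if 0 ≤ d then List.replicate d.toNat a else List.replicate (-d).toNat b

theorem getLast?_replicate (n : Nat) (a : Char) :
    (List.replicate n a).getLast? = if n = 0 then none else some a := by
  cases n with
  | zero => rfl
  | succ m =>
    simp only [Nat.succ_ne_zero, if_false]
    induction m with
    | zero => rfl
    | succ k ih => simpa [List.replicate_succ, List.getLast?_cons] using ih

theorem dropLast_replicate (n : Nat) (a : Char) :
    (List.replicate n a).dropLast = List.replicate (n - 1) a := by
  cases n with
  | zero => rfl
  | succ m =>
    rw [List.replicate_succ']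
    simp

-- one cancellation-stack step on the canonical shape: letter a pushes onto a's, pops a b
theorem step_rep_a (a b : Char) (hab : a ≠ b) (d : Int) :
    (if pvRep a b d ≠ [] ∧ (pvRep a b d).getLast? ≠ some a
       then (pvRep a b d).dropLast else pvRep a b d ++ [a])
    = pvRep a b (d + 1) := by
  by_cases hd : 0 ≤ d
  · have hrep : pvRep a b d = List.replicate d.toNat a := by simp [pvRep, hd]
    rw [hrep, if_neg]
    · have h1 : (d+1).toNat = d.toNat + 1 := by omega
      have h2 : List.replicate d.toNat a ++ [a] = List.replicate (d.toNat + 1) a :=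
        (List.replicate_succ' ..).symm
      rw [h2, pvRep, if_pos (by omega : (0:Int) ≤ d + 1), h1]
    · rintro ⟨hne, hlast⟩
      rw [getLast?_replicate] at hlast
      have : d.toNat ≠ 0 := fun h => hne (by simp [h])
      simp [this] at hlast
  · have hrep : pvRep a b d = List.replicate (-d).toNat b := by
      simp [pvRep, hd]
    rw [hrep, if_pos, dropLast_replicate]
    · by_cases h0 : d + 1 = 0
      · have : (-d).toNat - 1 = 0 := by omega
        rw [this, h0]; simp [pvRep]
      · have h1 : ¬ (0:Int) ≤ d + 1 := by omega
        have h2 : (-d).toNat - 1 = (-(d+1)).toNat := by omega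
        rw [h2, pvRep, if_neg h1]
    · constructor
      · simp [List.replicate_eq_nil_iff]; omega
      · rw [getLast?_replicate]
        have : (-d).toNat ≠ 0 := by omega
        simp [this, Ne.symm hab]

-- letter b pops an a off the stack, or pushes onto b's
theorem step_rep_b (a b : Char) (hab : a ≠ b) (d : Int) :
    (if pvRep a b d ≠ [] ∧ (pvRep a b d).getLast? ≠ some b
       then (pvRep a b d).dropLast else pvRep a b d ++ [b])
    = pvRep a b (d - 1) := by
  by_cases hd : 0 < d
  · have hrep : pvRep a b d = List.replicate d.toNat a := by
      simp [pvRep, (by omega : (0:Int) ≤ d)]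
    rw [hrep, if_pos, dropLast_replicate]
    · have h2 : d.toNat - 1 = (d - 1).toNat := by omega
      rw [h2, pvRep, if_pos (by omega : (0:Int) ≤ d - 1)]
    · constructor
      · simp [List.replicate_eq_nil_iff]; omega
      · rw [getLast?_replicate]
        have : d.toNat ≠ 0 := by omega
        simp [this, hab]
  · have hrep : pvRep a b d = List.replicate (-d).toNat b := by
      by_cases h0 : d = 0
      · simp [pvRep, h0]
      · unfold pvRep; rw [if_neg (by omega : ¬ (0:Int) ≤ d)]
    rw [hrep, if_neg]
    · have h2 : List.replicate (-d).toNat b ++ [b] = List.replicate ((-d).toNat + 1) b :=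
        (List.replicate_succ' ..).symm
      have h3 : (-(d-1)).toNat = (-d).toNat + 1 := by omega
      rw [h2, pvRep, if_neg (by omega : ¬ (0:Int) ≤ d - 1), h3]
    · rintro ⟨hne, hlast⟩
      rw [getLast?_replicate] at hlast
      have : (-d).toNat ≠ 0 := fun h => hne (by simp [h])
      simp [this] at hlast

-- the B fold keeps both stacks in canonical shape, tracking the net balances
theorem fold_rep (cs : List Char) (dy dx : Int) :
    cs.foldl (fun (acc : List Char × List Char) c =>
      if c == 'N' || c == 'S' then
        (if acc.1 ≠ [] ∧ acc.1.getLast? ≠ some c then acc.1.dropLast else acc.1 ++ [c], acc.2)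
      else if c == 'W' || c == 'E' then
        (acc.1, if acc.2 ≠ [] ∧ acc.2.getLast? ≠ some c then acc.2.dropLast else acc.2 ++ [c])
      else acc) (pvRep 'N' 'S' dy, pvRep 'W' 'E' dx)
    = (pvRep 'N' 'S' (dy + (cs.count 'N' : Int) - (cs.count 'S' : Int)),
       pvRep 'W' 'E' (dx + (cs.count 'W' : Int) - (cs.count 'E' : Int))) := by
  induction cs generalizing dy dx with
  | nil => simp
  | cons hd tl ih =>
    simp only [List.foldl_cons]
    by_cases h1 : hd = 'N'
    · subst h1
      rw [show (('N' == 'N' || 'N' == 'S') = true) from rfl, if_pos rfl]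
      rw [step_rep_a 'N' 'S' (by decide) dy, ih]
      simp only [List.count_cons]
      congr 1 <;> congr 1 <;> simp <;> omega
    · by_cases h2 : hd = 'S'
      · subst h2
        rw [show (('S' == 'N' || 'S' == 'S') = true) by decide, if_pos rfl]
        rw [step_rep_b 'N' 'S' (by decide) dy, ih]
        simp only [List.count_cons]
        congr 1 <;> congr 1 <;> simp <;> omega
      · by_cases h3 : hd = 'W'
        · subst h3
          rw [if_neg (by decide), show (('W' == 'W' || 'W' == 'E') = true) by decide, if_pos rfl]
          rw [step_rep_a 'W' 'E' (by decide) dx, ih]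
          simp only [List.count_cons]
          congr 1 <;> congr 1 <;> simp <;> omega
        · by_cases h4 : hd = 'E'
          · subst h4
            rw [if_neg (by decide), show (('E' == 'W' || 'E' == 'E') = true) by decide, if_pos rfl]
            rw [step_rep_b 'W' 'E' (by decide) dx, ih]
            simp only [List.count_cons]
            congr 1 <;> congr 1 <;> simp <;> omega
          · have e1 : (hd == 'N' || hd == 'S') = false := by simp [h1, h2]
            have e2 : (hd == 'W' || hd == 'E') = false := by simp [h3, h4]
            rw [e1, if_neg (by simp), e2, if_neg (by simp), ih]
            simp [h1, h2, h3, h4]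

-- A's four-counter fold computes the four character counts
theorem fold_counts (cs : List Char) (a b c d : Int) :
    cs.foldl (fun (acc : Int × Int × Int × Int) letter =>
      if letter == 'N' then (acc.1 + 1, acc.2.1, acc.2.2.1, acc.2.2.2)
      else if letter == 'S' then (acc.1, acc.2.1 + 1, acc.2.2.1, acc.2.2.2)
      else if letter == 'W' then (acc.1, acc.2.1, acc.2.2.1 + 1, acc.2.2.2)
      else if letter == 'E' then (acc.1, acc.2.1, acc.2.2.1, acc.2.2.2 + 1)
      else acc) (a, b, c, d)
    = (a + cs.count 'N', b + cs.count 'S', c + cs.count 'W', d + cs.count 'E') := by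
  induction cs generalizing a b c d with
  | nil => simp
  | cons hd tl ih =>
    simp only [List.foldl_cons]
    split_ifs with h1 h2 h3 h4 <;>
      rw [ih] <;> simp_all [Prod.ext_iff] <;> omega

theorem getLast?_pvRep (a b : Char) (d : Int) :
    (pvRep a b d).getLast? = if 0 < d then some a else if d < 0 then some b else none := by
  unfold pvRep
  split_ifs with h1 h2 h3 <;> rw [getLast?_replicate] <;> simp <;> omega

-- ===== VERDICT (by name: the statement is the Claim_ definition above) =====
theorem mvmnt_spec : Claim_equal_mvmnt := by
  intro string _
  unfold Spec_mvmnt mvmnt mvmnt_alt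
  have h0 : (([] : List Char), ([] : List Char)) = (pvRep 'N' 'S' 0, pvRep 'W' 'E' 0) := by
    simp [pvRep]
  simp only [fold_counts, h0, fold_rep, getLast?_pvRep]
  set cn := (string.toList.count 'N' : Int)
  set cs := (string.toList.count 'S' : Int)
  set cw := (string.toList.count 'W' : Int)
  set ce := (string.toList.count 'E' : Int)
  congr 1
  · split_ifs <;> first | rfl | omega
  · split_ifs <;> first | rfl | omega
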